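-- pv_equiv track=rewrite | github.com/Silva0308/Python_seminars | SEM_6/HW/04.py | num_tes
-- ===== SOURCE A (Python) =====
-- def num_tes(names: str):
--     names = names.split(', ')
--     result = {}
--     for name in names:
--         index = name.index(' ')
--         key = name[index+1]
--         if key not in result:
--             result[key] = []
--         result[key].append(name)
--     return result
-- ===== SOURCE B (Python) =====
-- def num_tes(names: str):
--     parts = names.split(', ')
--     keyed = [(n[n.index(' ') + 1], n) for n in parts]
--     order = list(dict.fromkeys(k for k, _ in keyed))
--     return {k: [n for kk, n in keyed if kk == k] for k in order}
-- ===== Notes on version B (the rewrite author's own statement) =====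
-- stated objective: alternative
-- what changed: Replaces A's online dict-accumulation loop (setdefault-then-append per name) by a two-pass comprehension: precompute each name's key, deduplicate the keys once with dict.fromkeys, then build each group by filtering the keyed list per distinct key.
import Mathlib
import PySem

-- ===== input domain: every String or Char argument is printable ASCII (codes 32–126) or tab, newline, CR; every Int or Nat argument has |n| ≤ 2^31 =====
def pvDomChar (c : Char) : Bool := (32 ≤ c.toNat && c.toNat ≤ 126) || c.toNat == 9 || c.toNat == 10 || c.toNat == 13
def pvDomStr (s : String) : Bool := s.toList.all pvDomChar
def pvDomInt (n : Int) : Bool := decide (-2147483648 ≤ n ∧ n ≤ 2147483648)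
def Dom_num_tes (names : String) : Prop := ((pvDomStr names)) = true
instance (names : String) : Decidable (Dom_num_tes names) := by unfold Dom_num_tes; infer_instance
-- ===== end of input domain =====

-- B groups by precomputing each name's key, deduplicating the keys once, and building each
-- group with a filter per distinct key (two-pass comprehension) instead of A's online
-- dict-accumulation loop; objective: alternative decomposition, same return value.

-- ===== PORT A =====
-- the key expression `name[name.index(' ') + 1]` shared verbatim by both Pythons
-- (none from pyGet? = the ValueError/IndexError cases, excluded by Pre_ below)
def pvKey (n : String) : String :=
  match PySem.Str.pyGet? n (PySem.Str.find n " " + 1) with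
  | some c => String.singleton c
  | none => ""

def num_tes (names : String) : List (String × List String) :=
  let parts := (PySem.Str.split? names ", ").getD []
  (parts.foldl
    (fun (result : PySem.Dict String (List String)) name =>
      let key := pvKey name
      let result := if result.contains key then result else result.insert key []
      result.insert key (result.getD key [] ++ [name]))
    PySem.Dict.empty).items

-- ===== PORT B =====
def num_tes_alt (names : String) : List (String × List String) :=
  let parts := (PySem.Str.split? names ", ").getD []
  let keyed := parts.map (fun n => (pvKey n, n))
  let order := PySem.List.dedup (keyed.map Prod.fst)
  order.map (fun k => (k, (keyed.filter (fun p => p.1 == k)).map Prod.snd))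

-- ===== PRECONDITION & SPEC =====
-- Pre_ excludes exactly the inputs where Python A raises: a comma-separated piece with no
-- space (ValueError from .index) or whose first space is its last character (IndexError).
def Pre_num_tes (names : String) : Prop :=
  ∀ n ∈ (PySem.Str.split? names ", ").getD [],
    0 ≤ PySem.Str.find n " " ∧ PySem.Str.find n " " + 1 < PySem.Str.len n
instance (names : String) : Decidable (Pre_num_tes names) := by unfold Pre_num_tes; infer_instance

def pvWitness_num_tes : String := "Ivan Ivanov, Petr Petrov, Anna Ivanova"

def Spec_num_tes (names : String) (out : List (String × List String)) : Prop := out = num_tes_alt names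
instance (names : String) (out : List (String × List String)) : Decidable (Spec_num_tes names out) := by unfold Spec_num_tes; infer_instance

-- ===== CLAIM (what is proved, stated in full; the proofs are below) =====
def Claim_equal_num_tes : Prop := ∀ (names : String), Dom_num_tes names → Pre_num_tes names → Spec_num_tes names (num_tes names)

-- ===== LEMMAS AND PROOFS =====

-- A's loop body (setdefault-then-append) is exactly one dict `modify` at the key
lemma pv_stepA_eq (d : PySem.Dict String (List String)) (n : String) :
    ((if d.contains (pvKey n) then d else d.insert (pvKey n) []).insert (pvKey n)
      ((if d.contains (pvKey n) then d else d.insert (pvKey n) []).getD (pvKey n) [] ++ [n]))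
    = d.modify (pvKey n) [] (· ++ [n]) := by
  by_cases h : d.contains (pvKey n)
  · simp only [h, if_true]
    rfl
  · simp only [h, Bool.false_eq_true, if_false,
      PySem.Dict.getD_insert_self, PySem.Dict.insert_insert_self]
    show d.insert (pvKey n) [n] = d.insert (pvKey n) (d.getD (pvKey n) [] ++ [n])
    rw [PySem.Dict.getD_of_not_contains d [] (by simpa using h)]
    rfl

-- ===== VERDICT (by name: the statement is the Claim_ definition above) =====
theorem num_tes_spec : Claim_equal_num_tes := by
  intro names _ _
  unfold Spec_num_tes num_tes num_tes_alt
  simp only []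
  set parts := (PySem.Str.split? names ", ").getD [] with hparts
  set keyed := parts.map (fun n => (pvKey n, n)) with hkeyed
  have hcongr := PySem.List.foldl_congr_mem parts
      (fun (result : PySem.Dict String (List String)) name =>
        (if result.contains (pvKey name) then result else result.insert (pvKey name) []).insert
          (pvKey name)
          ((if result.contains (pvKey name) then result
            else result.insert (pvKey name) []).getD (pvKey name) [] ++ [name]))
      (fun d n => d.modify (pvKey n) [] (· ++ [n])) PySem.Dict.empty
      (fun d n _ => pv_stepA_eq d n)
  rw [hcongr]
  have hfold : parts.foldl (fun d n => d.modify (pvKey n) [] (· ++ [n])) PySem.Dict.empty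
      = keyed.foldl (fun d p => d.modify p.1 [] (· ++ [p.2])) PySem.Dict.empty := by
    rw [hkeyed, List.foldl_map]
  rw [hfold]
  set D := keyed.foldl (fun d p => d.modify p.1 [] (· ++ [p.2])) PySem.Dict.empty with hD
  have hkeys : D.keys = PySem.List.dedup (keyed.map Prod.fst) := by
    rw [hD, PySem.Dict.keys_foldl_modify_key keyed Prod.fst [] (fun d p => (· ++ [p.2]))]
    simp [PySem.List.dedup_eq_ofList, PySem.Set.ofList_eq_foldl, PySem.Set.update,
      PySem.Dict.keys_empty]
  have hnodup : D.keys.Nodup := by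
    rw [hD]
    exact PySem.Dict.nodup_keys_foldl_modify_key keyed Prod.fst [] (fun d p => (· ++ [p.2]))
      PySem.Dict.empty (by simp [PySem.Dict.keys_empty])
  rw [PySem.Dict.items_eq_map_keys D hnodup [], hkeys]
  refine List.map_congr_left (fun k _ => ?_)
  have hget : D.getD k [] = (keyed.filter (fun p => p.1 == k)).map Prod.snd := by
    rw [hD, PySem.Dict.getD_foldl_modify_append keyed PySem.Dict.empty k]
    simp [PySem.Dict.getD_empty]
  rw [hget]
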